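-- pv_equiv track=rewrite | github.com/lcapossio/mjpegZero | python/verify_huffman_rom.py | verify_code_counts
-- ===== SOURCE A (Python) =====
-- def verify_code_counts(name, bits, vals, table):
--     """Verify the number of codes matches BITS and VALS."""
--     errors = []
--     expected_total = len(vals)
--     actual_total = len(table)
--     if expected_total != actual_total:
--         errors.append(f"  {name}: expected {expected_total} codes, got {actual_total}")
--
--     # Check codes per length match BITS array
--     len_counts = {}
--     for sym, (code_len, code_val) in table.items():
--         len_counts[code_len] = len_counts.get(code_len, 0) + 1
--
--     for i, count in enumerate(bits):
--         bit_len = i + 1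
--         actual = len_counts.get(bit_len, 0)
--         if actual != count:
--             errors.append(f"  {name}: length {bit_len}: expected {count} codes, got {actual}")
--
--     return errors
-- ===== SOURCE B (Python) =====
-- def verify_code_counts(name, bits, vals, table):
--     """Verify the number of codes matches BITS and VALS."""
--     errors = []
--     expected_total = len(vals)
--     actual_total = len(table)
--     if expected_total != actual_total:
--         errors.append(f"  {name}: expected {expected_total} codes, got {actual_total}")
--
--     # No length-count dictionary: sort the code lengths once, then walk the
--     # sorted list with a single advancing pointer while bit_len increases.
--     lens = sorted(code_len for (code_len, _code_val) in table.values())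
--     n = len(lens)
--     j = 0
--     for i, count in enumerate(bits):
--         bit_len = i + 1
--         while j < n and lens[j] < bit_len:
--             j += 1
--         k = j
--         while k < n and lens[k] == bit_len:
--             k += 1
--         actual = k - j
--         j = k
--         if actual != count:
--             errors.append(f"  {name}: length {bit_len}: expected {count} codes, got {actual}")
--
--     return errors
-- ===== Notes on version B (the rewrite author's own statement) =====
-- stated objective: alternative
-- what changed: Replaces A's len_counts dictionary pass with a sort of the code lengths followed by a merge-style single-pointer walk over the sorted lengths that yields the per-bit-length counts; the total-count check and the exact error strings are unchanged.
import Mathlib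
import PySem

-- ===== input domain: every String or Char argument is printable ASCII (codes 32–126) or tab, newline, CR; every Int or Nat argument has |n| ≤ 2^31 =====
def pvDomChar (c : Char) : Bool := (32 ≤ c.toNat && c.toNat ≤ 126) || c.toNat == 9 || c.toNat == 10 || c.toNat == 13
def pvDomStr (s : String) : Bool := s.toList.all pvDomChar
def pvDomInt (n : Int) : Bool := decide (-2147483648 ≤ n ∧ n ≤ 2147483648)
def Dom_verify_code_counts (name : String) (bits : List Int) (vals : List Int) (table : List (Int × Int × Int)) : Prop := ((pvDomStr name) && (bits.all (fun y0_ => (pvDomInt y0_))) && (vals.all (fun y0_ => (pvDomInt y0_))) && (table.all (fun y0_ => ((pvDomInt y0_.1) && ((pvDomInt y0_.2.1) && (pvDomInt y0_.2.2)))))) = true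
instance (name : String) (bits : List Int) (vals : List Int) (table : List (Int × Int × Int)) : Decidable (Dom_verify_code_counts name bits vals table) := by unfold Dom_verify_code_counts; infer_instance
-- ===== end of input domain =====

-- B replaces A's len_counts dictionary by sorting the code lengths once and walking the sorted
-- list with a single advancing pointer (merge-style) to obtain the per-length counts.
-- ===== PORT A =====
-- shared f-string builders (both Pythons format the identical messages)
def pvMsgTotal (name : String) (e a : Int) : String :=
  "  " ++ name ++ ": expected " ++ PySem.Int.toStr e ++ " codes, got " ++ PySem.Int.toStr a

def pvMsgLen (name : String) (bl c a : Int) : String :=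
  "  " ++ name ++ ": length " ++ PySem.Int.toStr bl ++ ": expected " ++ PySem.Int.toStr c ++ " codes, got " ++ PySem.Int.toStr a

def verify_code_counts (name : String) (bits : List Int) (vals : List Int) (table : List (Int × Int × Int)) : List String :=
  let expected_total : Int := vals.length
  let actual_total : Int := table.length
  let errors : List String :=
    if expected_total ≠ actual_total then [pvMsgTotal name expected_total actual_total] else []
  -- len_counts[code_len] = len_counts.get(code_len, 0) + 1 over table.items()
  let len_counts : PySem.Dict Int Int :=
    table.foldl (fun d e => d.insert e.2.1 (d.getD e.2.1 0 + 1)) PySem.Dict.empty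
  (PySem.List.enumerate bits 0).foldl (fun errs p =>
    let bit_len : Int := p.1 + 1
    let actual : Int := len_counts.getD bit_len 0
    if actual ≠ p.2 then errs ++ [pvMsgLen name bit_len p.2 actual] else errs) errors

-- ===== PORT B =====
-- while j < len(lens) and lens[j] < x: j += 1   (the guard makes the index access total, as in Python)
def pvSkip (lens : List Int) (x : Int) (j : Nat) : Nat :=
  if h : j < lens.length then
    if lens[j] < x then pvSkip lens x (j+1) else j
  else j
termination_by lens.length - j

-- while k < len(lens) and lens[k] == x: k += 1
def pvRun (lens : List Int) (x : Int) (k : Nat) : Nat :=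
  if h : k < lens.length then
    if lens[k] == x then pvRun lens x (k+1) else k
  else k
termination_by lens.length - k

def verify_code_counts_alt (name : String) (bits : List Int) (vals : List Int) (table : List (Int × Int × Int)) : List String :=
  let errors : List String :=
    if (vals.length : Int) ≠ (table.length : Int) then [pvMsgTotal name vals.length table.length] else []
  let lens : List Int := PySem.List.sorted (table.map (fun e => e.2.1)) (fun y => y) false
  ((PySem.List.enumerate bits 0).foldl (fun st (p : Int × Int) =>
      let bit_len : Int := p.1 + 1
      let j := pvSkip lens bit_len st.2
      let k := pvRun lens bit_len j
      let actual : Int := ((k - j : Nat) : Int)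
      (if actual ≠ p.2 then st.1 ++ [pvMsgLen name bit_len p.2 actual] else st.1, k))
    (errors, 0)).1

-- ===== PRECONDITION & SPEC =====
def Spec_verify_code_counts (name : String) (bits : List Int) (vals : List Int) (table : List (Int × Int × Int)) (out : List String) : Prop := out = verify_code_counts_alt name bits vals table
instance (name : String) (bits : List Int) (vals : List Int) (table : List (Int × Int × Int)) (out : List String) : Decidable (Spec_verify_code_counts name bits vals table out) := by unfold Spec_verify_code_counts; infer_instance

-- ===== CLAIM (what is proved, stated in full; the proofs are below) =====
def Claim_equal_verify_code_counts : Prop := ∀ (name : String) (bits : List Int) (vals : List Int) (table : List (Int × Int × Int)), Dom_verify_code_counts name bits vals table → Spec_verify_code_counts name bits vals table (verify_code_counts name bits vals table)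

-- ===== LEMMAS AND PROOFS =====
-- A's counter dict reads back as a countP over the table
lemma counter_getD_eq_countP (table : List (Int × Int × Int)) (k : Int) :
    (table.foldl (fun d e => d.insert e.2.1 (d.getD e.2.1 0 + 1)) PySem.Dict.empty).getD k 0
      = (table.countP (fun e => e.2.1 == k) : Int) := by
  suffices h : ∀ (d : PySem.Dict Int Int),
      (table.foldl (fun d e => d.insert e.2.1 (d.getD e.2.1 0 + 1)) d).getD k 0
        = d.getD k 0 + (table.countP (fun e => e.2.1 == k) : Int) by
    simpa using h PySem.Dict.empty
  induction table with
  | nil => simp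
  | cons e t ih =>
    intro d
    simp only [List.foldl_cons, List.countP_cons, ih]
    rw [PySem.Dict.getD_insert]
    by_cases hk : k = e.2.1
    · subst hk; simp; ring
    · have hne : (e.2.1 == k) = false := by simp; exact fun h => hk h.symm
      simp [hk, hne]

-- prefix fact on a pairwise-≤ list: an index satisfies a ≤-downward-closed bound iff it lies below the count
lemma pv_prefix_lt (lens : List Int) (hs : lens.Pairwise (· ≤ ·)) (x : Int) (j : Nat) (hj : j < lens.length) :
    lens[j] < x ↔ j < lens.countP (fun y => decide (y < x)) := by
  constructor
  · intro h
    have h1 : (lens.take (j+1)).countP (fun y => decide (y < x)) = j+1 := by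
      rw [List.countP_eq_length.mpr]
      · simp [List.length_take]; omega
      · intro a ha
        obtain ⟨i, hi, hia⟩ := List.mem_iff_getElem.mp ha
        have hilen : i < lens.length := lt_of_lt_of_le hi (by simp)
        have : lens.take (j+1) = List.take (j+1) lens := rfl
        have hgi : (lens.take (j+1))[i] = lens[i] := List.getElem_take
        have hij : i ≤ j := by simp [List.length_take] at hi; omega
        have : lens[i] ≤ lens[j] := by
          rcases eq_or_lt_of_le hij with rfl | hlt
          · exact le_refl _
          · exact (List.pairwise_iff_getElem.mp hs) i j hilen hj hlt
        simp [← hia, hgi]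
        omega
    calc j + 1 = (lens.take (j+1)).countP (fun y => decide (y < x)) := h1.symm
      _ ≤ lens.countP (fun y => decide (y < x)) := by
          conv_rhs => rw [← List.take_append_drop (j+1) lens]
          rw [List.countP_append]; omega
  · intro h
    by_contra hge
    push_neg at hge
    have h0 : (lens.drop j).countP (fun y => decide (y < x)) = 0 := by
      rw [List.countP_eq_zero.mpr]
      intro a ha
      obtain ⟨i, hi, hia⟩ := List.mem_iff_getElem.mp ha
      have hlen2 : j + i < lens.length := by simp at hi; omega
      have hdg : (lens.drop j)[i] = lens[j+i]'hlen2 := List.getElem_drop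
      have hji : lens[j] ≤ lens[j+i]'hlen2 := by
        rcases Nat.eq_zero_or_pos i with rfl | hpos
        · simp
        · exact (List.pairwise_iff_getElem.mp hs) j (j+i) hj (by simp at hi; omega) (by omega)
      simp [← hia, hdg]
      omega
    have : lens.countP (fun y => decide (y < x)) ≤ j := by
      conv_lhs => rw [← List.take_append_drop j lens]
      rw [List.countP_append, h0]
      have := List.countP_le_length (l := lens.take j) (p := fun y => decide (y < x))
      simp [List.length_take] at this ⊢
      omega
    omega

def pvCLT (lens : List Int) (x : Int) : Nat := lens.countP (fun y => decide (y < x))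

lemma pv_cnt_split (lens : List Int) (x : Int) :
    pvCLT lens (x+1) = pvCLT lens x + lens.count x := by
  unfold pvCLT
  induction lens with
  | nil => simp
  | cons a t ih =>
    simp only [List.countP_cons, List.count_cons, ih]
    by_cases ha : a < x
    · rw [show (decide (a < x + 1)) = true by simp; omega,
         show (decide (a < x)) = true by simp [ha],
         show (a == x) = false by simp; omega]
      simp; omega
    · by_cases hb : a = x
      · subst hb
        rw [show (decide (a < a + 1)) = true by simp,
           show (decide (a < a)) = false by simp,
           show (a == a) = true by simp]
        simp; omega
      · rw [show (decide (a < x + 1)) = false by simp; omega,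
           show (decide (a < x)) = false by simp [ha],
           show (a == x) = false by simp [hb]]
        simp

lemma pv_skip_spec (lens : List Int) (hs : lens.Pairwise (· ≤ ·)) (x : Int) (j : Nat)
    (hj : j ≤ pvCLT lens x) : pvSkip lens x j = pvCLT lens x := by
  unfold pvCLT at hj
  rw [pvSkip]
  split
  · rename_i h
    split
    · rename_i hlt
      have h2 := (pv_prefix_lt lens hs x j h).mp hlt
      exact pv_skip_spec lens hs x (j+1) (by unfold pvCLT; omega)
    · rename_i hge
      have hj2 : ¬ j < lens.countP (fun y => decide (y < x)) := fun hc =>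
        hge ((pv_prefix_lt lens hs x j h).mpr hc)
      unfold pvCLT; omega
  · rename_i h
    have := List.countP_le_length (p := fun y => decide (y < x)) (l := lens)
    unfold pvCLT; omega
termination_by lens.length - j

lemma pv_run_spec (lens : List Int) (hs : lens.Pairwise (· ≤ ·)) (x : Int) (k : Nat)
    (hlo : pvCLT lens x ≤ k) (hhi : k ≤ pvCLT lens (x+1)) :
    pvRun lens x k = pvCLT lens (x+1) := by
  unfold pvCLT at hlo hhi
  rw [pvRun]
  split
  · rename_i h
    split
    · rename_i heq
      have hx : lens[k] = x := by simpa using heq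
      have hk : k < lens.countP (fun y => decide (y < x+1)) :=
        (pv_prefix_lt lens hs (x+1) k h).mp (by omega)
      exact pv_run_spec lens hs x (k+1) (by unfold pvCLT; omega) (by unfold pvCLT; omega)
    · rename_i hne
      by_contra hc
      unfold pvCLT at hc
      have hk : k < lens.countP (fun y => decide (y < x+1)) := by omega
      have h1 : lens[k] < x + 1 := (pv_prefix_lt lens hs (x+1) k h).mpr hk
      have h2 : ¬ lens[k] < x := by
        intro hlt
        have := (pv_prefix_lt lens hs x k h).mp hlt
        omega
      exact hne (by simp only [beq_iff_eq]; omega)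
  · rename_i h
    have := List.countP_le_length (p := fun y => decide (y < x+1)) (l := lens)
    unfold pvCLT; omega
termination_by lens.length - k

lemma pv_count_lens (table : List (Int × Int × Int)) (x : Int) :
    (PySem.List.sorted (table.map (fun e => e.2.1)) (fun y => y) false).count x
      = table.countP (fun e => e.2.1 == x) := by
  rw [(PySem.List.sorted_perm _ _ _).count_eq]
  induction table with
  | nil => simp
  | cons e t ih => simp [List.count_cons, List.countP_cons, ih]

lemma pv_loop (lens : List Int) (hs : lens.Pairwise (· ≤ ·)) (name : String) (bits : List Int) :
    ∀ (s : Int) (errs : List String) (j : Nat), j ≤ pvCLT lens (s+1) →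
    ((PySem.List.enumerate bits s).foldl (fun st (p : Int × Int) =>
        (if ((pvRun lens (p.1+1) (pvSkip lens (p.1+1) st.2) - pvSkip lens (p.1+1) st.2 : Nat) : Int) ≠ p.2
         then st.1 ++ [pvMsgLen name (p.1+1) p.2 ((pvRun lens (p.1+1) (pvSkip lens (p.1+1) st.2) - pvSkip lens (p.1+1) st.2 : Nat) : Int)]
         else st.1, pvRun lens (p.1+1) (pvSkip lens (p.1+1) st.2)))
      (errs, j)).1
    = (PySem.List.enumerate bits s).foldl (fun errs (p : Int × Int) =>
        if ((lens.count (p.1+1) : Nat) : Int) ≠ p.2 then errs ++ [pvMsgLen name (p.1+1) p.2 (lens.count (p.1+1))] else errs) errs := by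
  induction bits with
  | nil => intro s errs j _; simp [PySem.List.enumerate]
  | cons b t ih =>
    intro s errs j hj
    rw [PySem.List.enumerate_cons]
    simp only [List.foldl_cons]
    have hskip : pvSkip lens (s+1) j = pvCLT lens (s+1) := pv_skip_spec lens hs (s+1) j hj
    have hsplit := pv_cnt_split lens (s+1)
    have hle : pvCLT lens (s+1) ≤ pvCLT lens (s+1+1) := by omega
    have hrun : pvRun lens (s+1) (pvCLT lens (s+1)) = pvCLT lens (s+1+1) :=
      pv_run_spec lens hs (s+1) (pvCLT lens (s+1)) (le_refl _) hle
    have hcnt : pvRun lens (s+1) (pvSkip lens (s+1) j) - pvSkip lens (s+1) j = lens.count (s+1) := by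
      rw [hskip, hrun]; omega
    rw [hcnt, hskip, hrun]
    exact ih (s+1) _ _ (le_of_eq rfl)

-- ===== VERDICT (by name: the statement is the Claim_ definition above) =====
theorem verify_code_counts_spec : Claim_equal_verify_code_counts := by
  intro name bits vals table _
  unfold Spec_verify_code_counts verify_code_counts verify_code_counts_alt
  simp only []
  refine Eq.trans (PySem.List.foldl_congr_mem _ _ _ _ ?_)
    ((pv_loop _ (PySem.List.sorted_pairwise _ _) name bits 0 _ 0 (Nat.zero_le _)).symm)
  intro acc p _
  rw [counter_getD_eq_countP, ← pv_count_lens]
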